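-- pv_equiv track=rewrite | github.com/joseguardo/IntelligentChunking | app/services/utils.py | split_paragraphs_and_tables
-- ===== SOURCE A (Python) =====
-- from typing import List, Tuple, Dict, Any
--
-- def split_paragraphs_and_tables(section_text: str) -> List[str]:
--     """
--     Divide una sección en bloques de párrafos y tablas.
--
--     Args:
--         section_text: Text content of a section
--
--     Returns:
--         List of text blocks (paragraphs and tables)
--     """
--     if not section_text.strip():
--         return []
--
--     lines = section_text.split('\n')
--     blocks = []
--     i = 0
--     n = len(lines)
--
--     while i < n:
--         if lines[i].strip().startswith('|'):
--             # Table block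
--             tbl_lines = []
--             while i < n and lines[i].strip().startswith('|'):
--                 tbl_lines.append(lines[i])
--                 i += 1
--             table_content = '\n'.join(tbl_lines).strip()
--             if table_content:
--                 blocks.append(table_content)
--         else:
--             # Paragraph block
--             para_lines = []
--             while i < n and lines[i].strip() != '' and not lines[i].strip().startswith('|'):
--                 para_lines.append(lines[i])
--                 i += 1
--             paragraph_content = '\n'.join(para_lines).strip()
--             if paragraph_content:
--                 blocks.append(paragraph_content)
--
--             # Skip empty lines
--             while i < n and lines[i].strip() == '':
--                 i += 1
--
--     return [b for b in blocks if b.strip()]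
-- ===== SOURCE B (Python) =====
-- import re
--
-- # One block = a maximal run of table lines (first non-blank char '|') or a
-- # maximal run of paragraph lines (non-empty, first non-blank char not '|'),
-- # matched directly on the raw text; blank lines are never inside a match.
-- _BLOCK_RE = re.compile(
--     r"^[ \t\r]*\|.*(?:\n[ \t\r]*\|.*)*"                        # table-line run
--     r"|^[ \t\r]*[^ \t\r\n|].*(?:\n[ \t\r]*[^ \t\r\n|].*)*",    # paragraph-line run
--     re.MULTILINE,
-- )
--
-- def split_paragraphs_and_tables(section_text):
--     return [b for m in _BLOCK_RE.finditer(section_text) if (b := m.group(0).strip())]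
-- ===== Notes on version B (the rewrite author's own statement) =====
-- stated objective: simpler
-- what changed: Replaces A's split-into-lines plus nested while-loop run scanning (and its guard and final filter) by a single multiline regular expression on the raw text whose matches are exactly the maximal table-line or paragraph-line runs, collected in one list comprehension.
import Mathlib
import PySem

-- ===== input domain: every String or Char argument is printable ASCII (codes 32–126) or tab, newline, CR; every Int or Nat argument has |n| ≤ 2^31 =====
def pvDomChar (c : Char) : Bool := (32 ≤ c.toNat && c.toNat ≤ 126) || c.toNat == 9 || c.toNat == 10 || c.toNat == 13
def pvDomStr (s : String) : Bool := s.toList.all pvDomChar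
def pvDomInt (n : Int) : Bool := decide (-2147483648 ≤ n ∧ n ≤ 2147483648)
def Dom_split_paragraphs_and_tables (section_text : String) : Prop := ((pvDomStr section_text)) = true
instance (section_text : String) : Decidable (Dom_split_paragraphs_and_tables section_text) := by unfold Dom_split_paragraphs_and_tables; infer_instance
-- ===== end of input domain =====

-- B replaces A's split-into-lines + nested while-loop run scanning (with its guard and
-- final filter) by one multiline regular expression whose matches are exactly the
-- maximal table-line / paragraph-line runs of the raw text (simpler; same cost).

-- ===== PORT A =====
def aIsTable (l : String) : Bool := PySem.Str.startswith (PySem.Str.strip l) "|"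
def aIsEmpty (l : String) : Bool := PySem.Str.strip l == ""

-- inner while collecting consecutive table lines ('tbl_lines', rest)
def aSpanTable : List String → List String × List String
  | [] => ([], [])
  | l :: ls =>
    if aIsTable l then
      let p := aSpanTable ls
      (l :: p.1, p.2)
    else ([], l :: ls)

-- inner while collecting consecutive paragraph lines ('para_lines', rest)
def aSpanPara : List String → List String × List String
  | [] => ([], [])
  | l :: ls =>
    if !aIsEmpty l && !aIsTable l then
      let p := aSpanPara ls
      (l :: p.1, p.2)
    else ([], l :: ls)

-- inner while skipping empty lines
def aDropEmpty : List String → List String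
  | [] => []
  | l :: ls => if aIsEmpty l then aDropEmpty ls else l :: ls

-- the outer 'while i < n' loop; fuel only makes the recursion structural
def aLoop : Nat → List String → List String
  | 0, _ => []
  | _, [] => []
  | fuel + 1, l :: rest =>
    if aIsTable l then
      let p := aSpanTable (l :: rest)
      let tableContent := PySem.Str.strip (PySem.Str.join "\n" p.1)
      (if tableContent != "" then [tableContent] else []) ++ aLoop fuel p.2
    else
      let p := aSpanPara (l :: rest)
      let paragraphContent := PySem.Str.strip (PySem.Str.join "\n" p.1)
      (if paragraphContent != "" then [paragraphContent] else []) ++ aLoop fuel (aDropEmpty p.2)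

def split_paragraphs_and_tables (section_text : String) : List String :=
  if PySem.Str.strip section_text == "" then []
  else
    let lines := (PySem.Str.split? section_text "\n").getD []
    (aLoop lines.length lines).filter (fun b => PySem.Str.strip b != "")

-- ===== PORT B =====
-- Hand port of Source B's single regex  ^[ \t\r]*\|.*(?:\n[ \t\r]*\|.*)*
--                                  |^[ \t\r]*[^ \t\r\n|].*(?:\n[ \t\r]*[^ \t\r\n|].*)*
-- in MULTILINE mode (PySem has no regex). The port is exact for this pattern: both
-- alternatives are '^'-anchored and '.' never crosses '\n', so the text decomposes
-- into '\n'-separated lines; a match starts at a line whose first non-[ \t\r] char is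
-- '|' (table alternative) or any other non-'\n' char (paragraph alternative), the
-- character classes make the leading [ \t\r]* non-backtracking, and the greedy
-- (?:\n…)* extends the match over the maximal run of lines of the same alternative;
-- finditer yields these maximal matches left to right.

-- the char class [ \t\r]
def reWS (c : Char) : Bool := c == ' ' || c == '\t' || c == '\r'

-- which alternative matches one line: some true = table, some false = paragraph, none = neither
def reCat (l : String) : Option Bool :=
  match l.toList.dropWhile reWS with
  | [] => none
  | c :: _ => if c == '\n' then none else some (c == '|')

-- finditer: left-to-right maximal matches of the pattern
def bScan : List String → List String
  | [] => []
  | l :: ls =>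
    match reCat l with
    | none => bScan ls
    | some t =>
      PySem.Str.join "\n" (l :: ls.takeWhile (fun y => reCat y == some t)) ::
        bScan (ls.dropWhile (fun y => reCat y == some t))
termination_by xs => xs.length
decreasing_by
  · simp only [List.length_cons]; omega
  · have := List.length_dropWhile_le (fun y => reCat y == some t) ls
    simp only [List.length_cons]; omega

-- [b for m in finditer(...) if (b := m.group(0).strip())]
def split_paragraphs_and_tables_alt (section_text : String) : List String :=
  ((bScan ((PySem.Str.split? section_text "\n").getD [])).map PySem.Str.strip).filter
    (fun b => b != "")

-- ===== PRECONDITION & SPEC =====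
def Spec_split_paragraphs_and_tables (section_text : String) (out : List String) : Prop := out = split_paragraphs_and_tables_alt section_text
instance (section_text : String) (out : List String) : Decidable (Spec_split_paragraphs_and_tables section_text out) := by unfold Spec_split_paragraphs_and_tables; infer_instance

-- ===== CLAIM (what is proved, stated in full; the proofs are below) =====
def Claim_equal_split_paragraphs_and_tables : Prop := ∀ (section_text : String), Dom_split_paragraphs_and_tables section_text → Spec_split_paragraphs_and_tables section_text (split_paragraphs_and_tables section_text)

-- ===== LEMMAS AND PROOFS =====

-- a line as produced by splitting a Dom string on '\n': printable chars, no newline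
def lineOK (l : String) : Prop := ∀ c ∈ l.toList, pvDomChar c = true ∧ c ≠ '\n'

-- the contribution of one regex match to B's output
def emitB (r : String) : List String :=
  if PySem.Str.strip r != "" then [PySem.Str.strip r] else []

theorem char_eq_of_toNat {c d : Char} (h : c.toNat = d.toNat) : c = d := by
  rw [← Char.ofNat_toNat c, h, Char.ofNat_toNat]

theorem beq_char_iff_toNat (c d : Char) : (c == d) = decide (c.toNat = d.toNat) := by
  by_cases h : c = d
  · simp [h]
  · have hn : c.toNat ≠ d.toNat := fun hh => h (char_eq_of_toNat hh)
    simp [h, hn]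

-- on newline-free Dom characters Python's str.strip whitespace is exactly [ \t\r]
theorem isspace_eq_reWS {c : Char} (hd : pvDomChar c = true) (hn : c ≠ '\n') :
    PySem.Chars.isspace c = reWS c := by
  have hn' : c.toNat ≠ 10 := fun hh => hn (char_eq_of_toNat hh)
  simp only [pvDomChar, Bool.or_eq_true, Bool.and_eq_true, decide_eq_true_eq,
    beq_iff_eq] at hd
  rw [Bool.eq_iff_iff]
  simp only [PySem.Chars.isspace, reWS, beq_char_iff_toNat, Bool.or_eq_true,
    Bool.and_eq_true, decide_eq_true_eq, Char.reduceToNat]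
  omega

-- rstrip keeps the head of a list starting with a non-whitespace char
theorem rstrip_head {c : Char} (r : List Char) (hc : PySem.Chars.isspace c = false) :
    ∃ u, PySem.Chars.rstrip (c :: r) = c :: u := by
  unfold PySem.Chars.rstrip
  have hne : List.dropWhile PySem.Chars.isspace (c :: r).reverse ≠ [] := by
    intro hall
    rw [List.dropWhile_eq_nil_iff] at hall
    have := hall c (by simp)
    rw [hc] at this
    exact Bool.false_ne_true this
  have hpre : (List.dropWhile PySem.Chars.isspace (c :: r).reverse).reverse <+: (c :: r) := by
    have h1 := List.dropWhile_suffix (l := (c :: r).reverse) PySem.Chars.isspace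
    have h2 := List.reverse_prefix.mpr h1
    simpa using h2
  cases ht : (List.dropWhile PySem.Chars.isspace (c :: r).reverse).reverse with
  | nil =>
    rw [List.reverse_eq_nil_iff] at ht
    exact absurd ht hne
  | cons d u =>
    rw [ht] at hpre
    obtain ⟨tl, htl⟩ := hpre
    simp only [List.cons_append] at htl
    have hdc : d = c := by injection htl
    exact ⟨u, by rw [hdc]⟩

-- a string whose strip is empty is all whitespace
theorem strip_nil_all_ws {cs : List Char} (h : PySem.Chars.strip cs = []) :
    ∀ c ∈ cs, PySem.Chars.isspace c = true := by
  suffices hdw : List.dropWhile PySem.Chars.isspace cs = [] by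
    exact List.dropWhile_eq_nil_iff.mp hdw
  cases hdw : List.dropWhile PySem.Chars.isspace cs with
  | nil => rfl
  | cons c r =>
    have hcne : List.dropWhile PySem.Chars.isspace cs ≠ [] := by rw [hdw]; simp
    have hhead := List.head_dropWhile_not PySem.Chars.isspace hcne
    simp only [hdw, List.head_cons] at hhead
    obtain ⟨u, hu⟩ := rstrip_head r (by simpa using hhead)
    unfold PySem.Chars.strip PySem.Chars.lstrip at h
    rw [hdw, hu] at h
    cases h

-- on newline-free Dom characters lstrip's dropWhile coincides with the regex's [ \t\r]*
theorem dropWhile_ws_congr : ∀ cs : List Char, (∀ c ∈ cs, pvDomChar c = true ∧ c ≠ '\n') →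
    List.dropWhile PySem.Chars.isspace cs = List.dropWhile reWS cs := by
  intro cs H
  induction cs with
  | nil => rfl
  | cons c cs ih =>
    have hc := H c (by simp)
    have hic := isspace_eq_reWS hc.1 hc.2
    by_cases hw : reWS c = true
    · rw [List.dropWhile_cons_of_pos (by rw [hic]; exact hw),
        List.dropWhile_cons_of_pos hw]
      exact ih (fun x hx => H x (by simp [hx]))
    · rw [List.dropWhile_cons_of_neg (by rw [hic]; simpa using hw),
        List.dropWhile_cons_of_neg (by simpa using hw)]

-- the core classification fact relating B's reCat to A's line tests
theorem cat_core (l : String) (H : lineOK l) :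
    (aIsEmpty l = true ∧ aIsTable l = false ∧ reCat l = none) ∨
    (aIsEmpty l = false ∧ reCat l = some (aIsTable l)) := by
  have hdw := dropWhile_ws_congr l.toList H
  cases h : List.dropWhile reWS l.toList with
  | nil =>
    left
    have hstrip : (PySem.Str.strip l).toList = [] := by
      rw [PySem.Str.toList_strip]
      unfold PySem.Chars.strip PySem.Chars.lstrip
      rw [hdw, h]
      rfl
    have hs : PySem.Str.strip l = "" := by
      rw [← String.toList_inj, hstrip]; rfl
    refine ⟨?_, ?_, ?_⟩
    · simp [aIsEmpty, hs]
    · rw [aIsTable, hs]; decide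
    · unfold reCat; rw [h]
  | cons c r =>
    right
    have hcmem : c ∈ l.toList := by
      have hsub := (List.dropWhile_suffix (l := l.toList) reWS).subset
      exact hsub (by rw [h]; simp)
    obtain ⟨hdom, hnl⟩ := H c hcmem
    have hcne : List.dropWhile reWS l.toList ≠ [] := by rw [h]; simp
    have hhead := List.head_dropWhile_not reWS hcne
    simp only [h, List.head_cons] at hhead
    have hnws : reWS c = false := by simpa using hhead
    have hnis : PySem.Chars.isspace c = false := by
      rw [isspace_eq_reWS hdom hnl]; exact hnws
    obtain ⟨u, hu⟩ : ∃ u, (PySem.Str.strip l).toList = c :: u := by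
      rw [PySem.Str.toList_strip]
      unfold PySem.Chars.strip PySem.Chars.lstrip
      rw [hdw, h]
      exact rstrip_head r hnis
    have hne' : PySem.Str.strip l ≠ "" := by
      intro he; rw [he] at hu; cases hu
    constructor
    · unfold aIsEmpty; exact beq_eq_false_iff_ne.mpr hne'
    · have htab : aIsTable l = (c == '|') := by
        unfold aIsTable
        rw [show PySem.Str.startswith (PySem.Str.strip l) "|"
            = PySem.Chars.startswith (PySem.Str.strip l).toList ['|'] from by
          simp [PySem.Str.startswith]]
        rw [hu]
        unfold PySem.Chars.startswith
        by_cases hcq : c = '|'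
        · simp [List.isPrefixOf, hcq]
        · simp [List.isPrefixOf, hcq, show ¬'|' = c from fun hh => hcq hh.symm]
      have hcn : (c == '\n') = false := beq_eq_false_iff_ne.mpr hnl
      have hre : reCat l = some (c == '|') := by
        simp [reCat, h, hcn]
      rw [htab]
      exact hre

-- pointwise predicate bridges for the run spans
theorem catT (l : String) (H : lineOK l) : (reCat l == some true) = aIsTable l := by
  rcases cat_core l H with ⟨_, ht, hc⟩ | ⟨_, hc⟩
  · rw [hc, ht]; rfl
  · rw [hc]; cases h : aIsTable l <;> rfl

theorem catP (l : String) (H : lineOK l) :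
    (reCat l == some false) = (!aIsEmpty l && !aIsTable l) := by
  rcases cat_core l H with ⟨he, ht, hc⟩ | ⟨he, hc⟩
  · rw [hc, he, ht]; rfl
  · rw [hc, he]; cases h : aIsTable l <;> rfl

-- A's three inner while loops are takeWhile / dropWhile
theorem spanTable_eq (xs : List String) :
    aSpanTable xs = (xs.takeWhile aIsTable, xs.dropWhile aIsTable) := by
  induction xs with
  | nil => rfl
  | cons l ls ih => by_cases h : aIsTable l <;> simp [aSpanTable, h, ih]

theorem spanPara_eq (xs : List String) :
    aSpanPara xs = (xs.takeWhile (fun y => !aIsEmpty y && !aIsTable y),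
                    xs.dropWhile (fun y => !aIsEmpty y && !aIsTable y)) := by
  induction xs with
  | nil => rfl
  | cons l ls ih => by_cases h : (!aIsEmpty l && !aIsTable l) <;> simp [aSpanPara, h, ih]

theorem dropEmpty_eq (xs : List String) :
    aDropEmpty xs = xs.dropWhile aIsEmpty := by
  induction xs with
  | nil => rfl
  | cons l ls ih => by_cases h : aIsEmpty l <;> simp [aDropEmpty, h, ih]

theorem span_congr {α : Type} (p q : α → Bool) (xs : List α) (h : ∀ x ∈ xs, p x = q x) :
    xs.takeWhile p = xs.takeWhile q ∧ xs.dropWhile p = xs.dropWhile q := by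
  induction xs with
  | nil => exact ⟨rfl, rfl⟩
  | cons x xs ih =>
    have hx : p x = q x := h x (by simp)
    have ih' := ih (fun y hy => h y (by simp [hy]))
    cases hq : q x with
    | true =>
      rw [List.takeWhile_cons_of_pos (by rw [hx]; exact hq),
        List.takeWhile_cons_of_pos hq,
        List.dropWhile_cons_of_pos (by rw [hx]; exact hq),
        List.dropWhile_cons_of_pos hq, ih'.1, ih'.2]
      exact ⟨rfl, rfl⟩
    | false =>
      rw [List.takeWhile_cons_of_neg (by rw [hx, hq]; simp),
        List.takeWhile_cons_of_neg (by rw [hq]; simp),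
        List.dropWhile_cons_of_neg (by rw [hx, hq]; simp),
        List.dropWhile_cons_of_neg (by rw [hq]; simp)]
      exact ⟨rfl, rfl⟩

-- bScan unfoldings
theorem bScan_nil : bScan [] = [] := by
  rw [bScan]

theorem bScan_cons_none {l : String} {ls : List String} (h : reCat l = none) :
    bScan (l :: ls) = bScan ls := by
  rw [bScan, h]

theorem bScan_cons_some {l : String} {ls : List String} {t : Bool} (h : reCat l = some t) :
    bScan (l :: ls) =
      PySem.Str.join "\n" (l :: ls.takeWhile (fun y => reCat y == some t)) ::
        bScan (ls.dropWhile (fun y => reCat y == some t)) := by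
  rw [bScan, h]

theorem bScan_all_none : ∀ xs : List String, (∀ l ∈ xs, reCat l = none) → bScan xs = [] := by
  intro xs h
  induction xs with
  | nil => exact bScan_nil
  | cons l ls ih =>
    rw [bScan_cons_none (h l (by simp))]
    exact ih (fun x hx => h x (by simp [hx]))

-- skipping empty lines does not change the remaining matches
theorem bScan_dropEmpty (xs : List String) (H : ∀ l ∈ xs, lineOK l) :
    bScan (aDropEmpty xs) = bScan xs := by
  induction xs with
  | nil => rfl
  | cons m ms ih =>
    by_cases hm : aIsEmpty m
    · have hcat : reCat m = none := by
        rcases cat_core m (H m (by simp)) with ⟨_, _, h⟩ | ⟨he, _⟩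
        · exact h
        · rw [hm] at he; cases he
      rw [show aDropEmpty (m :: ms) = aDropEmpty ms from by simp [aDropEmpty, hm],
        ih (fun l hl => H l (by simp [hl])), bScan_cons_none hcat]
    · simp [aDropEmpty, hm]

-- one step of A's outer while loop, unfolded
theorem aLoop_succ_cons (fuel : Nat) (l : String) (rest : List String) :
    aLoop (fuel + 1) (l :: rest) =
      if aIsTable l then
        (if PySem.Str.strip (PySem.Str.join "\n" (aSpanTable (l :: rest)).1) != ""
         then [PySem.Str.strip (PySem.Str.join "\n" (aSpanTable (l :: rest)).1)] else []) ++
        aLoop fuel (aSpanTable (l :: rest)).2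
      else
        (if PySem.Str.strip (PySem.Str.join "\n" (aSpanPara (l :: rest)).1) != ""
         then [PySem.Str.strip (PySem.Str.join "\n" (aSpanPara (l :: rest)).1)] else []) ++
        aLoop fuel (aDropEmpty (aSpanPara (l :: rest)).2) := rfl

-- A's outer loop emits exactly the contributions of B's regex matches
theorem main_loop : ∀ (fuel : Nat) (ls : List String), ls.length ≤ fuel →
    (∀ l ∈ ls, lineOK l) → aLoop fuel ls = (bScan ls).flatMap emitB := by
  intro fuel
  induction fuel with
  | zero =>
    intro ls h _
    rw [Nat.le_zero, List.length_eq_zero_iff] at h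
    subst h
    rw [bScan_nil]; rfl
  | succ fuel ih =>
    intro ls h H
    match ls with
    | [] => rw [bScan_nil]; rfl
    | l :: rest =>
      have Hl := H l (by simp)
      have Hrest : ∀ x ∈ rest, lineOK x := fun x hx => H x (by simp [hx])
      have hrest : rest.length ≤ fuel := by simpa using h
      rcases cat_core l Hl with ⟨he, ht, hc⟩ | ⟨he, hc⟩
      · -- blank line: A emits nothing and skips, B's finditer skips it
        rw [aLoop_succ_cons, if_neg (by simp [ht]), spanPara_eq]
        rw [List.takeWhile_cons_of_neg (p := fun y => !aIsEmpty y && !aIsTable y)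
            (by simp [he]),
          List.dropWhile_cons_of_neg (p := fun y => !aIsEmpty y && !aIsTable y)
            (by simp [he])]
        rw [show (if PySem.Str.strip (PySem.Str.join "\n" ([] : List String)) != ""
            then [PySem.Str.strip (PySem.Str.join "\n" ([] : List String))] else [])
            = ([] : List String) from by decide]
        rw [List.nil_append]
        rw [show aDropEmpty (l :: rest) = aDropEmpty rest from by simp [aDropEmpty, he]]
        have hlen : (aDropEmpty rest).length ≤ fuel := by
          rw [dropEmpty_eq]
          exact le_trans (List.length_dropWhile_le _ _) hrest
        have Hsub : ∀ x ∈ aDropEmpty rest, lineOK x := by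
          intro x hx
          rw [dropEmpty_eq] at hx
          exact Hrest x ((List.dropWhile_suffix aIsEmpty).subset hx)
        rw [ih _ hlen Hsub, bScan_dropEmpty rest Hrest, bScan_cons_none hc]
      · cases htab : aIsTable l with
        | true =>
          -- table run
          rw [htab] at hc
          rw [aLoop_succ_cons, if_pos htab, spanTable_eq]
          rw [List.takeWhile_cons_of_pos htab, List.dropWhile_cons_of_pos htab]
          rw [bScan_cons_some hc, List.flatMap_cons]
          have hpq := span_congr (fun y => reCat y == some true) aIsTable rest
            (fun y hy => catT y (Hrest y hy))
          rw [hpq.1, hpq.2]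
          have hlen : (rest.dropWhile aIsTable).length ≤ fuel :=
            le_trans (List.length_dropWhile_le _ _) hrest
          have Hsub : ∀ x ∈ rest.dropWhile aIsTable, lineOK x :=
            fun x hx => Hrest x ((List.dropWhile_suffix aIsTable).subset hx)
          rw [ih _ hlen Hsub]
          rfl
        | false =>
          -- paragraph run
          have hpl : (!aIsEmpty l && !aIsTable l) = true := by rw [he, htab]; rfl
          rw [htab] at hc
          rw [aLoop_succ_cons, if_neg (by simp [htab]), spanPara_eq]
          rw [List.takeWhile_cons_of_pos (p := fun y => !aIsEmpty y && !aIsTable y)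
              (by exact hpl),
            List.dropWhile_cons_of_pos (p := fun y => !aIsEmpty y && !aIsTable y)
              (by exact hpl)]
          rw [bScan_cons_some hc, List.flatMap_cons]
          have hpq := span_congr (fun y => reCat y == some false)
            (fun y => !aIsEmpty y && !aIsTable y) rest (fun y hy => catP y (Hrest y hy))
          rw [hpq.1, hpq.2]
          have Hd : ∀ x ∈ rest.dropWhile (fun y => !aIsEmpty y && !aIsTable y), lineOK x :=
            fun x hx => Hrest x ((List.dropWhile_suffix _).subset hx)
          have hlen : (aDropEmpty (rest.dropWhile (fun y => !aIsEmpty y && !aIsTable y))).length ≤ fuel := by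
            rw [dropEmpty_eq]
            exact le_trans (List.length_dropWhile_le _ _)
              (le_trans (List.length_dropWhile_le _ _) hrest)
          have Hsub : ∀ x ∈ aDropEmpty (rest.dropWhile (fun y => !aIsEmpty y && !aIsTable y)), lineOK x := by
            intro x hx
            rw [dropEmpty_eq] at hx
            exact Hd x ((List.dropWhile_suffix _).subset hx)
          rw [ih _ hlen Hsub, bScan_dropEmpty _ Hd]
          rfl

-- the already-left-stripped list stays fixed under a further lstrip after rstrip
theorem lstrip_rstrip_lstrip (p : Char → Bool) (s : List Char) :
    List.dropWhile p ((List.dropWhile p (List.dropWhile p s).reverse).reverse)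
      = (List.dropWhile p (List.dropWhile p s).reverse).reverse := by
  cases hu : (List.dropWhile p (List.dropWhile p s).reverse).reverse with
  | nil => simp
  | cons a u' =>
    have hpref : a :: u' <+: List.dropWhile p s := by
      rw [← hu]
      have h1 := List.dropWhile_suffix (l := (List.dropWhile p s).reverse) p
      have h2 := List.reverse_prefix.mpr h1
      simpa using h2
    obtain ⟨r, hr⟩ := hpref
    have hds : List.dropWhile p s = a :: (u' ++ r) := by rw [← hr]; simp
    have hne : List.dropWhile p s ≠ [] := by rw [hds]; simp
    have h4 := List.head_dropWhile_not p hne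
    simp only [hds, List.head_cons] at h4
    simp [h4]

-- Python's str.strip is idempotent
theorem chars_strip_idem (cs : List Char) :
    PySem.Chars.strip (PySem.Chars.strip cs) = PySem.Chars.strip cs := by
  unfold PySem.Chars.strip PySem.Chars.lstrip PySem.Chars.rstrip
  rw [lstrip_rstrip_lstrip, List.reverse_reverse]
  exact lstrip_rstrip_lstrip _ _

theorem strip_idem (s : String) :
    PySem.Str.strip (PySem.Str.strip s) = PySem.Str.strip s := by
  rw [← String.toList_inj, PySem.Str.toList_strip, PySem.Str.toList_strip,
    chars_strip_idem]

-- B's comprehension over the matches is the flatMap of emitB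
theorem map_strip_filter (rs : List String) :
    (rs.map PySem.Str.strip).filter (fun b => b != "") = rs.flatMap emitB := by
  induction rs with
  | nil => rfl
  | cons r rs ih =>
    simp only [List.map_cons, List.filter_cons, List.flatMap_cons]
    by_cases h : PySem.Str.strip r != ""
    · simp [emitB, h, ih]
    · simp [emitB, h, ih]

-- A's final filter keeps every emitted (already stripped, non-empty) block
theorem filter_E (rs : List String) :
    (rs.flatMap emitB).filter (fun b => PySem.Str.strip b != "") = rs.flatMap emitB := by
  rw [List.filter_eq_self]
  intro b hb
  rw [List.mem_flatMap] at hb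
  obtain ⟨r, _, hb⟩ := hb
  unfold emitB at hb
  split at hb
  · rename_i hne
    rw [List.mem_singleton] at hb
    subst hb
    simpa [strip_idem] using hne
  · simp at hb

-- characters of every '\n'-split piece come from the string and are not '\n'
theorem go_chars : ∀ (fuel : Nat) (l cur : List Char) (acc : List (List Char)),
    l.length < fuel →
    ∀ p ∈ PySem.Chars.splitOn.go ['\n'] fuel l cur acc, ∀ c ∈ p,
      ((c ∈ l ∧ c ≠ '\n') ∨ c ∈ cur ∨ ∃ q ∈ acc, c ∈ q) := by
  intro fuel
  induction fuel with
  | zero => intro l cur acc h; omega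
  | succ fuel ih =>
    intro l cur acc h p hp c hc
    cases l with
    | nil =>
      have hgo : PySem.Chars.splitOn.go ['\n'] (fuel + 1) [] cur acc
          = (cur.reverse :: acc).reverse := by
        simp [PySem.Chars.splitOn.go]
      rw [hgo, List.mem_reverse] at hp
      rcases List.mem_cons.mp hp with hp | hp
      · subst hp; right; left; simpa using hc
      · right; right; exact ⟨p, hp, hc⟩
    | cons d rest =>
      have hgo : PySem.Chars.splitOn.go ['\n'] (fuel + 1) (d :: rest) cur acc =
          if ['\n'].isPrefixOf (d :: rest) then
            PySem.Chars.splitOn.go ['\n'] fuel rest [] (cur.reverse :: acc)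
          else PySem.Chars.splitOn.go ['\n'] fuel rest (d :: cur) acc := by
        simp [PySem.Chars.splitOn.go]
      by_cases hd : d = '\n'
      · rw [hgo, if_pos (by simp [List.isPrefixOf, hd])] at hp
        have := ih rest [] (cur.reverse :: acc) (by simpa using h) p hp c hc
        rcases this with ⟨hcl, hcn⟩ | hcur | ⟨q, hq, hcq⟩
        · exact Or.inl ⟨by simp [hcl], hcn⟩
        · simp at hcur
        · rcases List.mem_cons.mp hq with rfl | hq'
          · exact Or.inr (Or.inl (by simpa using hcq))
          · exact Or.inr (Or.inr ⟨q, hq', hcq⟩)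
      · rw [hgo, if_neg (by simp [List.isPrefixOf]; exact fun hh => hd hh.symm)] at hp
        have := ih rest (d :: cur) acc (by simpa using h) p hp c hc
        rcases this with ⟨hcl, hcn⟩ | hcur | hacc
        · exact Or.inl ⟨by simp [hcl], hcn⟩
        · rcases List.mem_cons.mp hcur with rfl | hcur'
          · exact Or.inl ⟨by simp, hd⟩
          · exact Or.inr (Or.inl hcur')
        · exact Or.inr (Or.inr hacc)

theorem line_chars {cs : List Char} {p : List Char} (hp : p ∈ PySem.Chars.splitOn cs ['\n'])
    {c : Char} (hc : c ∈ p) : c ∈ cs ∧ c ≠ '\n' := by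
  unfold PySem.Chars.splitOn at hp
  have := go_chars (cs.length + 1) cs [] [] (by omega) p hp c hc
  rcases this with h | h | ⟨q, hq, _⟩
  · exact h
  · simp at h
  · simp at hq

-- ===== VERDICT (by name: the statement is the Claim_ definition above) =====
theorem split_paragraphs_and_tables_spec : Claim_equal_split_paragraphs_and_tables := by
  intro s hDom
  unfold Spec_split_paragraphs_and_tables split_paragraphs_and_tables
    split_paragraphs_and_tables_alt
  have hlines : (PySem.Str.split? s "\n").getD []
      = (PySem.Chars.splitOn s.toList ['\n']).map String.ofList := by
    simp [PySem.Str.split?, PySem.Chars.split?,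
      show ("\n".toList) = ['\n'] from by decide]
  have HL2 : ∀ l ∈ (PySem.Str.split? s "\n").getD [],
      ∀ c ∈ l.toList, (pvDomChar c = true ∧ c ≠ '\n') ∧ c ∈ s.toList := by
    rw [hlines]
    intro l hl c hcl
    rw [List.mem_map] at hl
    obtain ⟨p, hpmem, rfl⟩ := hl
    rw [String.toList_ofList] at hcl
    have h2 := line_chars hpmem hcl
    have hdom : pvDomChar c = true := by
      have hD := hDom
      unfold Dom_split_paragraphs_and_tables pvDomStr at hD
      exact List.all_eq_true.mp hD c h2.1
    exact ⟨⟨hdom, h2.2⟩, h2.1⟩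
  have HL : ∀ l ∈ (PySem.Str.split? s "\n").getD [], lineOK l :=
    fun l hl c hcl => (HL2 l hl c hcl).1
  by_cases hg : PySem.Str.strip s == ""
  · rw [if_pos hg]
    have hsws : ∀ c ∈ s.toList, PySem.Chars.isspace c = true := by
      apply strip_nil_all_ws
      have hs0 : PySem.Str.strip s = "" := eq_of_beq hg
      rw [← PySem.Str.toList_strip, hs0]
      rfl
    have hnone : ∀ l ∈ (PySem.Str.split? s "\n").getD [], reCat l = none := by
      intro l hl
      have hall : ∀ c ∈ l.toList, reWS c = true := by
        intro c hcl
        obtain ⟨⟨hdom, hne⟩, hmem⟩ := HL2 l hl c hcl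
        rw [← isspace_eq_reWS hdom hne]
        exact hsws c hmem
      unfold reCat
      rw [List.dropWhile_eq_nil_iff.mpr hall]
    rw [bScan_all_none _ hnone]
    rfl
  · rw [if_neg hg]
    show List.filter (fun b => PySem.Str.strip b != "")
        (aLoop ((PySem.Str.split? s "\n").getD []).length
          ((PySem.Str.split? s "\n").getD [])) = _
    rw [main_loop _ _ (le_refl _) HL, filter_E, map_strip_filter]
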